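-- pv_equiv track=rewrite | github.com/bucciadimela2-0/DnaWalk | main.py | dna_walk
-- ===== SOURCE A (Python) =====
-- def dna_walk(sequence):
--     x, y = 0, 0
--     walk = [(x, y)]
--     for nucleotide in sequence:
--         if nucleotide == 'A':
--             x -= 1
--         elif nucleotide == 'T':
--             x += 1
--         elif nucleotide == 'C':
--             y -= 1
--         elif nucleotide == 'G':
--             y += 1
--         walk.append((x, y))
--     return walk
-- ===== SOURCE B (Python) =====
-- _DELTA = {'A': (-1, 0), 'T': (1, 0), 'C': (0, -1), 'G': (0, 1)}
--
-- def dna_walk(sequence):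
--     # Backward scan: accumulate suffix sums of the step deltas, then recover
--     # each walk position as (grand total) - (suffix sum starting there).
--     sx = sy = 0
--     suff = []
--     for c in reversed(sequence):
--         suff.append((sx, sy))
--         dx, dy = _DELTA.get(c, (0, 0))
--         sx += dx
--         sy += dy
--     suff.append((sx, sy))
--     return [(sx - ux, sy - uy) for ux, uy in reversed(suff)]
-- ===== Notes on version B (the rewrite author's own statement) =====
-- stated objective: alternative
-- what changed: B traverses the sequence backwards accumulating suffix sums of table-decoded deltas, then derives each walk position as grand-total minus suffix sum, instead of A's forward pass appending running coordinates.
import Mathlib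
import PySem

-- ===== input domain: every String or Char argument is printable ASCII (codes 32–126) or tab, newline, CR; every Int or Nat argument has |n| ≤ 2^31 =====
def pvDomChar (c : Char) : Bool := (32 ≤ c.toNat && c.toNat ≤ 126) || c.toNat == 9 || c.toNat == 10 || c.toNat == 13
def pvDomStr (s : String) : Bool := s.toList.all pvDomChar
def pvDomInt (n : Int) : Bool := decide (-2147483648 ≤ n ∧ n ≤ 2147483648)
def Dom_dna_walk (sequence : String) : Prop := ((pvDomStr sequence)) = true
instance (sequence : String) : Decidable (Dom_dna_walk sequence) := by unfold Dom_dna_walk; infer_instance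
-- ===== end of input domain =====

-- B scans the sequence backwards accumulating suffix delta sums, then takes total minus suffix; alternative decomposition, no speed claim.

-- ===== PORT A =====
-- one loop step: update (x, y) by the if/elif chain
def dnaStep (p : Int × Int) (c : Char) : Int × Int :=
  if c = 'A' then (p.1 - 1, p.2)
  else if c = 'T' then (p.1 + 1, p.2)
  else if c = 'C' then (p.1, p.2 - 1)
  else if c = 'G' then (p.1, p.2 + 1)
  else p

def dna_walk (sequence : String) : List (Int × Int) :=
  (sequence.toList.foldl
    (fun (st : (Int × Int) × List (Int × Int)) c =>
      let p := dnaStep st.1 c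
      (p, st.2 ++ [p]))
    ((0, 0), [((0, 0) : Int × Int)])).2

-- ===== PORT B =====
-- the delta table, as a Python dict
def dnaTable : PySem.Dict Char (Int × Int) :=
  PySem.Dict.mk [('A', (-1, 0)), ('T', (1, 0)), ('C', (0, -1)), ('G', (0, 1))]

-- one step of Source B's backward loop: record the current suffix sum, then add c's delta
def dnaSuffStep (st : (Int × Int) × List (Int × Int)) (c : Char) : (Int × Int) × List (Int × Int) :=
  let d := PySem.Dict.getD dnaTable c (0, 0)
  ((st.1.1 + d.1, st.1.2 + d.2), st.2 ++ [st.1])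

def dna_walk_alt (sequence : String) : List (Int × Int) :=
  let r := sequence.toList.reverse.foldl dnaSuffStep ((0, 0), [])
  let suff := r.2 ++ [r.1]
  suff.reverse.map (fun u => (r.1.1 - u.1, r.1.2 - u.2))

-- ===== PRECONDITION & SPEC =====
def Spec_dna_walk (sequence : String) (out : List (Int × Int)) : Prop := out = dna_walk_alt sequence
instance (sequence : String) (out : List (Int × Int)) : Decidable (Spec_dna_walk sequence out) := by unfold Spec_dna_walk; infer_instance

-- ===== CLAIM (what is proved, stated in full; the proofs are below) =====
def Claim_equal_dna_walk : Prop := ∀ (sequence : String), Dom_dna_walk sequence → Spec_dna_walk sequence (dna_walk sequence)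

-- ===== LEMMAS AND PROOFS =====

def dnaAdd (p q : Int × Int) : Int × Int := (p.1 + q.1, p.2 + q.2)

def dnaDelta (c : Char) : Int × Int := PySem.Dict.getD dnaTable c (0, 0)

-- the if/elif step equals adding the table delta
theorem dnaStep_eq_add (p : Int × Int) (c : Char) :
    dnaStep p c = dnaAdd p (dnaDelta c) := by
  by_cases hA : c = 'A'
  · subst hA
    simp [dnaStep, dnaAdd, dnaDelta, dnaTable, PySem.Dict.getD, PySem.Dict.get?_mk_cons]
    omega
  by_cases hT : c = 'T'
  · subst hT
    simp [dnaStep, dnaAdd, dnaDelta, dnaTable, PySem.Dict.getD, PySem.Dict.get?_mk_cons]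
  by_cases hC : c = 'C'
  · subst hC
    simp [dnaStep, dnaAdd, dnaDelta, dnaTable, PySem.Dict.getD, PySem.Dict.get?_mk_cons, hA, hT]
    omega
  by_cases hG : c = 'G'
  · subst hG
    simp [dnaStep, dnaAdd, dnaDelta, dnaTable, PySem.Dict.getD, PySem.Dict.get?_mk_cons, hA, hT, hC]
  · simp [dnaStep, dnaAdd, dnaDelta, dnaTable, PySem.Dict.getD, PySem.Dict.get?,
      hA, hT, hC, hG, Ne.symm hA, Ne.symm hT, Ne.symm hC, Ne.symm hG]

-- scanl's head is its seed: re-attaching the seed to the tail is the identity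
theorem scanl_cons_tail (f : Int × Int → Int × Int → Int × Int) (a : Int × Int)
    (l : List (Int × Int)) : a :: (List.scanl f a l).tail = List.scanl f a l := by
  cases l <;> simp

-- loop invariant: A's fold with accumulator w produces w ++ (scanl from p).tail
theorem dnaLoop_eq (l : List Char) (p : Int × Int) (w : List (Int × Int)) :
    (l.foldl (fun (st : (Int × Int) × List (Int × Int)) c =>
        let q := dnaStep st.1 c
        (q, st.2 ++ [q])) (p, w)).2
      = w ++ (List.scanl dnaAdd p (l.map dnaDelta)).tail := by
  induction l generalizing p w with
  | nil => simp
  | cons c l ih =>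
      simp only [List.foldl_cons, List.map_cons, List.scanl_cons, List.tail_cons]
      rw [ih, dnaStep_eq_add]
      rw [List.append_assoc]
      rw [List.singleton_append]
      exact congrArg (w ++ ·) (scanl_cons_tail dnaAdd _ _)

-- shifting the seed of a delta scan translates every point of the scan
theorem scanl_shift (ds : List (Int × Int)) (a p : Int × Int) :
    List.scanl dnaAdd (dnaAdd a p) ds
      = (List.scanl dnaAdd a ds).map (fun q => (q.1 + p.1, q.2 + p.2)) := by
  induction ds generalizing a with
  | nil => simp [dnaAdd]
  | cons d ds ih =>
      simp only [List.scanl_cons, List.map_cons]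
      have h : dnaAdd (dnaAdd a p) d = dnaAdd (dnaAdd a d) p := by
        simp [dnaAdd]; constructor <;> ring
      rw [h, ih]
      rfl

-- scanl over an appended last element
theorem scanl_snoc (l : List (Int × Int)) (a d : Int × Int) :
    List.scanl dnaAdd a (l ++ [d])
      = List.scanl dnaAdd a l ++ [dnaAdd (l.foldl dnaAdd a) d] := by
  induction l generalizing a with
  | nil => simp
  | cons e l ih => simp [List.scanl_cons, ih]

-- Source B's backward loop collects exactly the scan of the reversed deltas,
-- and its running pair ends at the fold of the reversed deltas
theorem dnaSuffLoop (m : List Char) (a : Int × Int) (w : List (Int × Int)) :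
    (m.foldl dnaSuffStep (a, w)).1 = (m.map dnaDelta).foldl dnaAdd a
      ∧ (m.foldl dnaSuffStep (a, w)).2 ++ [(m.foldl dnaSuffStep (a, w)).1]
          = w ++ List.scanl dnaAdd a (m.map dnaDelta) := by
  induction m generalizing a w with
  | nil => simp
  | cons c m ih =>
      have h1 : dnaSuffStep (a, w) c = (dnaAdd a (dnaDelta c), w ++ [a]) := by
        simp [dnaSuffStep, dnaAdd, dnaDelta]
      simp only [List.foldl_cons, h1, List.map_cons, List.scanl_cons]
      obtain ⟨ha, hb⟩ := ih (dnaAdd a (dnaDelta c)) (w ++ [a])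
      refine ⟨by simpa using ha, ?_⟩
      rw [hb, List.append_assoc, List.singleton_append]

-- total minus suffix sums (read back-to-front) are the prefix sums
theorem dnaKey (ds : List (Int × Int)) :
    (List.scanl dnaAdd (0, 0) ds.reverse).reverse.map
        (fun u => ((ds.reverse.foldl dnaAdd (0, 0)).1 - u.1,
                   (ds.reverse.foldl dnaAdd (0, 0)).2 - u.2))
      = List.scanl dnaAdd (0, 0) ds := by
  induction ds with
  | nil => simp
  | cons d ds ih =>
      have hrev : (d :: ds).reverse = ds.reverse ++ [d] := by simp
      rw [hrev, scanl_snoc, List.foldl_append]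
      set T := ds.reverse.foldl dnaAdd (0, 0) with hT
      simp only [List.foldl_cons, List.foldl_nil, List.reverse_append,
        List.reverse_singleton, List.singleton_append, List.map_cons]
      have hhead : ((dnaAdd T d).1 - (dnaAdd T d).1, (dnaAdd T d).2 - (dnaAdd T d).2)
          = ((0, 0) : Int × Int) := by simp [dnaAdd]
      have hmap : (List.scanl dnaAdd (0, 0) ds.reverse).reverse.map
            (fun u => ((dnaAdd T d).1 - u.1, (dnaAdd T d).2 - u.2))
          = ((List.scanl dnaAdd (0, 0) ds.reverse).reverse.map
              (fun u => (T.1 - u.1, T.2 - u.2))).map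
              (fun q => (q.1 + d.1, q.2 + d.2)) := by
        rw [List.map_map]
        refine List.map_congr_left (fun u _ => ?_)
        simp [dnaAdd]
        constructor <;> ring
      rw [hhead, hmap, ih, ← scanl_shift, List.scanl_cons]

-- ===== VERDICT (by name: the statement is the Claim_ definition above) =====
theorem dna_walk_spec : Claim_equal_dna_walk := by
  intro s _
  show dna_walk s = dna_walk_alt s
  unfold dna_walk dna_walk_alt
  rw [dnaLoop_eq]
  obtain ⟨h1, h2⟩ := dnaSuffLoop s.toList.reverse ((0, 0) : Int × Int) []
  simp only [List.nil_append] at h2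
  dsimp only
  rw [h2, h1]
  have hm : s.toList.reverse.map dnaDelta = (s.toList.map dnaDelta).reverse := by
    simp
  rw [hm, dnaKey]
  cases h : s.toList.map dnaDelta <;> simp
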